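-- pv_equiv track=rewrite | github.com/jcolinpatrick/kryptos | scripts/two_system/e_running_key_crib_drag.py | keyword_to_order
-- ===== SOURCE A (Python) =====
-- def keyword_to_order(keyword: str, width: int) -> list[int] | None:
--     """Convert keyword to column order."""
--     kw = keyword[:width].upper()
--     if len(kw) < width:
--         return None
--     indexed = [(ch, i) for i, ch in enumerate(kw)]
--     ranked = sorted(indexed, key=lambda x: (x[0], x[1]))
--     order = [0] * width
--     for rank, (_, pos) in enumerate(ranked):
--         order[pos] = rank
--     return order
-- ===== SOURCE B (Python) =====
-- def keyword_to_order(keyword: str, width: int) -> list[int] | None: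
--     """Convert keyword to column order (rank by counting, no sort)."""
--     kw = keyword[:width].upper()
--     if len(kw) < width:
--         return None
--     order = [0] * width
--     for i, ch in enumerate(kw):
--         order[i] = sum(1 for j, c in enumerate(kw) if c < ch or (c == ch and j < i))
--     return order
-- ===== Notes on version B (the rewrite author's own statement) =====
-- stated objective: alternative
-- what changed: Replaces sort-then-scatter (sort (char,index) pairs, write ranks back by position) with a direct double scan that computes each position's rank as the count of lexicographically smaller (char,index) pairs.
import Mathlib
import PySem

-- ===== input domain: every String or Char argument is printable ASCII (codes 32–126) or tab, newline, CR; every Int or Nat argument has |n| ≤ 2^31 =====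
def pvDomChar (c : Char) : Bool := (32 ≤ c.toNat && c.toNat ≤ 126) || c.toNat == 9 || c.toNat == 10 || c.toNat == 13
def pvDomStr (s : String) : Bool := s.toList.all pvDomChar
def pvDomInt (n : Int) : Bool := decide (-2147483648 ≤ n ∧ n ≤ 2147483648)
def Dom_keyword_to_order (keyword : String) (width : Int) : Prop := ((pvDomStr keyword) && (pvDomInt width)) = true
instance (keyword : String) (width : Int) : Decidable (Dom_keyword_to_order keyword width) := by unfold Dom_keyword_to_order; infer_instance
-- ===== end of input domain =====

-- B replaces A's sort-then-scatter by a direct count of lexicographically smaller (char, index)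
-- pairs per position: a genuinely different algorithm of similar size (not claimed faster).

-- ===== PORT A =====
def keyword_to_order (keyword : String) (width : Int) : Option (List Int) :=
  let kw : List Char := PySem.Chars.upper (PySem.List.slice keyword.toList none (some width))
  if (kw.length : Int) < width then none
  else
    let indexed : List (Char × Int) := (PySem.List.enumerate kw).map (fun p => (p.2, p.1))
    let ranked : List (Char × Int) :=
      PySem.List.sorted indexed (fun x => toLex (x.1, x.2)) false
    let order : List Int := List.replicate width.toNat 0
    some ((PySem.List.enumerate ranked).foldl
      (fun ord rp => PySem.List.pySetD ord rp.2.2 rp.1) order)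

-- ===== PORT B =====
def keyword_to_order_alt (keyword : String) (width : Int) : Option (List Int) :=
  let kw : List Char := PySem.Chars.upper (PySem.List.slice keyword.toList none (some width))
  if (kw.length : Int) < width then none
  else
    let order : List Int := List.replicate width.toNat 0
    some ((PySem.List.enumerate kw).foldl
      (fun ord p => PySem.List.pySetD ord p.1
        (((PySem.List.enumerate kw).countP
          (fun q => q.2 < p.2 || (q.2 == p.2 && q.1 < p.1))) : Int)) order)

-- ===== PRECONDITION & SPEC =====
-- Pre_ excludes exactly the inputs where A raises IndexError: a negative width whose
-- truncation leaves a nonempty keyword (order = [0]*width is empty but gets indexed).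
def Pre_keyword_to_order (keyword : String) (width : Int) : Prop :=
  0 ≤ width ∨ (keyword.toList.length : Int) + width ≤ 0
instance (keyword : String) (width : Int) : Decidable (Pre_keyword_to_order keyword width) := by
  unfold Pre_keyword_to_order; infer_instance
def pvWitness_keyword_to_order : String × Int := ("CAB", 3)

def Spec_keyword_to_order (keyword : String) (width : Int) (out : Option (List Int)) : Prop :=
  out = keyword_to_order_alt keyword width
instance (keyword : String) (width : Int) (out : Option (List Int)) :
    Decidable (Spec_keyword_to_order keyword width out) := by
  unfold Spec_keyword_to_order; infer_instance

-- ===== CLAIM (what is proved, stated in full; the proofs are below) =====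
def Claim_equal_keyword_to_order : Prop := ∀ (keyword : String) (width : Int),
  Dom_keyword_to_order keyword width → Pre_keyword_to_order keyword width →
  Spec_keyword_to_order keyword width (keyword_to_order keyword width)

-- ===== LEMMAS AND PROOFS =====

-- The scatter loop of A, abstracted.
def pvScatter (l : List (Int × (Char × Int))) (acc : List Int) : List Int :=
  l.foldl (fun ord rp => PySem.List.pySetD ord rp.2.2 rp.1) acc

theorem pvScatter_length (l : List (Int × (Char × Int))) (acc : List Int) :
    (pvScatter l acc).length = acc.length := by
  induction l generalizing acc with
  | nil => rfl
  | cons q l ih => simp [pvScatter, List.foldl_cons] at *; rw [ih]; simp [PySem.List.length_pySetD]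

theorem pvScatter_get_notmem (l : List (Int × (Char × Int))) (acc : List Int) (i : Nat)
    (hne : ∀ p ∈ l, p.2.2 ≠ (i : Int)) (hnn : ∀ p ∈ l, 0 ≤ p.2.2) :
    (pvScatter l acc)[i]? = acc[i]? := by
  induction l generalizing acc with
  | nil => rfl
  | cons q l ih =>
    have hq2 : 0 ≤ q.2.2 := hnn q (by simp)
    have hqne : q.2.2 ≠ (i : Int) := hne q (by simp)
    rw [pvScatter, List.foldl_cons, ← pvScatter,
      ih _ (fun p hp => hne p (by simp [hp])) (fun p hp => hnn p (by simp [hp])),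
      PySem.List.pySetD_of_nonneg acc q.1 hq2, List.getElem?_set_ne]
    omega

theorem pvScatter_get_mem (l : List (Int × (Char × Int))) (acc : List Int) (r : Int) (c : Char)
    (i : Nat) (hm : (r, (c, (i : Int))) ∈ l) (hnd : (l.map (fun p => p.2.2)).Nodup)
    (hnn : ∀ p ∈ l, 0 ≤ p.2.2) (hi : i < acc.length) :
    (pvScatter l acc)[i]? = some r := by
  induction l generalizing acc with
  | nil => simp at hm
  | cons q l ih =>
    simp only [List.map_cons, List.nodup_cons] at hnd
    rcases List.mem_cons.mp hm with heq | hmem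
    · subst heq
      rw [pvScatter, List.foldl_cons, ← pvScatter,
        pvScatter_get_notmem _ _ i
          (fun p hp h => hnd.1 (by
            have hm2 := List.mem_map_of_mem (f := fun p => p.2.2) hp
            simpa [h] using hm2))
          (fun p hp => hnn p (by simp [hp]))]
      simp only [PySem.List.pySetD_natCast]
      rw [List.getElem?_set_self]
      omega
    · have hqne : q.2.2 ≠ (i : Int) := by
        intro h
        exact hnd.1 (h ▸ (by simpa using List.mem_map_of_mem (f := fun p => p.2.2) hmem))
      rw [pvScatter, List.foldl_cons, ← pvScatter]
      exact ih _ hmem hnd.2 (fun p hp => hnn p (by simp [hp]))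
        (by rw [PySem.List.length_pySetD]; exact hi)

-- The fill loop of B, abstracted: write f p at index p.1 for each enumerated pair.
def pvFill (l : List (Int × Char)) (f : Int × Char → Int) (acc : List Int) : List Int :=
  l.foldl (fun ord p => PySem.List.pySetD ord p.1 (f p)) acc

theorem pvFill_length (l : List (Int × Char)) (f : Int × Char → Int) (acc : List Int) :
    (pvFill l f acc).length = acc.length := by
  induction l generalizing acc with
  | nil => rfl
  | cons q l ih => simp [pvFill, List.foldl_cons] at *; rw [ih]; simp [PySem.List.length_pySetD]

theorem pvFill_get_notmem (l : List (Int × Char)) (f : Int × Char → Int) (acc : List Int) (i : Nat)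
    (hne : ∀ p ∈ l, p.1 ≠ (i : Int)) (hnn : ∀ p ∈ l, 0 ≤ p.1) :
    (pvFill l f acc)[i]? = acc[i]? := by
  induction l generalizing acc with
  | nil => rfl
  | cons q l ih =>
    have hq1 : 0 ≤ q.1 := hnn q (by simp)
    have hqne : q.1 ≠ (i : Int) := hne q (by simp)
    rw [pvFill, List.foldl_cons, ← pvFill,
      ih _ (fun p hp => hne p (by simp [hp])) (fun p hp => hnn p (by simp [hp])),
      PySem.List.pySetD_of_nonneg acc (f q) hq1, List.getElem?_set_ne]
    omega

theorem pvFill_get_mem (l : List (Int × Char)) (f : Int × Char → Int) (acc : List Int) (c : Char)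
    (i : Nat) (hm : ((i : Int), c) ∈ l) (hnd : (l.map (fun p => p.1)).Nodup)
    (hnn : ∀ p ∈ l, 0 ≤ p.1) (hi : i < acc.length) :
    (pvFill l f acc)[i]? = some (f ((i : Int), c)) := by
  induction l generalizing acc with
  | nil => simp at hm
  | cons q l ih =>
    simp only [List.map_cons, List.nodup_cons] at hnd
    rcases List.mem_cons.mp hm with heq | hmem
    · rw [pvFill, List.foldl_cons, ← pvFill,
        pvFill_get_notmem _ _ _ i
          (fun p hp h => hnd.1 (by
            have hm2 := List.mem_map_of_mem (f := fun p => p.1) hp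
            simpa [← heq, h] using hm2))
          (fun p hp => hnn p (by simp [hp])), ← heq]
      simp only [PySem.List.pySetD_natCast]
      rw [List.getElem?_set_self]
      omega
    · have hqne : q.1 ≠ (i : Int) := by
        intro h
        exact hnd.1 (h ▸ (by simpa using List.mem_map_of_mem (f := fun p => p.1) hmem))
      rw [pvFill, List.foldl_cons, ← pvFill]
      exact ih _ hmem hnd.2 (fun p hp => hnn p (by simp [hp]))
        (by rw [PySem.List.length_pySetD]; exact hi)

-- B's fill loop produces the rank map.
theorem pvFillCore (kw : List Char) (f : Int × Char → Int) :
    pvFill (PySem.List.enumerate kw) f (List.replicate kw.length (0 : Int))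
    = (List.range kw.length).map (fun (i : Nat) => f ((i : Int), kw[i]!)) := by
  have hnd : ((PySem.List.enumerate kw).map (fun p => p.1)).Nodup := by
    rw [show (fun p : Int × Char => p.1) = (fun p : Int × Char => p.1) from rfl,
      PySem.List.map_fst_enumerate]
    exact PySem.List.nodup_pyRange_one _ _
  have hnn : ∀ p ∈ PySem.List.enumerate kw, 0 ≤ p.1 := by
    intro p hp
    obtain ⟨k, hk, rfl⟩ := (PySem.List.mem_enumerate_iff _ _ _).mp hp
    simp
  apply List.ext_getElem?
  intro i
  by_cases hi : i < kw.length
  · have hmem : (((0 : Int) + (i : Nat)), kw[i]) ∈ PySem.List.enumerate kw :=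
      (PySem.List.mem_enumerate_iff _ _ _).mpr ⟨i, hi, rfl⟩
    rw [show ((0 : Int) + (i : Nat)) = ((i : Nat) : Int) by omega] at hmem
    rw [pvFill_get_mem _ f _ (kw[i]) i hmem hnd hnn (by simpa using hi)]
    simp [hi, getElem!_pos kw i hi]
  · rw [List.getElem?_eq_none (by rw [pvFill_length]; simp; omega),
      List.getElem?_eq_none (by simp; omega)]

theorem pvCountP_key_lt {α κ : Type} [LinearOrder κ] (key : α → κ) (l : List α) (k : Nat)
    (hk : k < l.length) (m : α) (hm : l[k]'hk = m)
    (hp : l.Pairwise (fun a b => key a < key b)) :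
    l.countP (fun x => decide (key x < key m)) = k := by
  induction l generalizing k with
  | nil => simp at hk
  | cons a t ih =>
    rcases List.pairwise_cons.mp hp with ⟨ha, hpt⟩
    cases k with
    | zero =>
      simp only [List.getElem_cons_zero] at hm
      subst hm
      simp only [List.countP_cons, lt_irrefl, decide_false]
      rw [List.countP_eq_zero.mpr]
      · simp
      · intro x hx
        simp only [decide_eq_true_iff]
        exact not_lt_of_gt (ha x hx)
    | succ k =>
      have hk' : k < t.length := by simpa using hk
      simp only [List.getElem_cons_succ] at hm
      have h2 : key a < key m := hm ▸ ha _ (List.getElem_mem hk')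
      simp only [List.countP_cons, decide_eq_true_iff]
      rw [if_pos h2, ih k hk' hm hpt]

theorem pvKeyInj : Function.Injective (fun x : Char × Int => toLex (x.1, x.2)) := by
  intro a b h
  have := toLex.injective h
  simpa using this

-- A's sort-then-scatter also produces the rank map.
theorem pvCore (kw : List Char) :
    pvScatter
      (PySem.List.enumerate (PySem.List.sorted
        ((PySem.List.enumerate kw).map (fun p => (p.2, p.1)))
        (fun x => toLex (x.1, x.2)) false))
      (List.replicate kw.length (0 : Int))
    = (List.range kw.length).map (fun (i : Nat) =>
        (((PySem.List.enumerate kw).countP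
          (fun p => p.2 < kw[i]! || (p.2 == kw[i]! && p.1 < (i : Int)))) : Int)) := by
  set key : Char × Int → Lex (Char × Int) := fun x => toLex (x.1, x.2) with hkey
  set indexed : List (Char × Int) := (PySem.List.enumerate kw).map (fun p => (p.2, p.1)) with hidx
  set ranked : List (Char × Int) := PySem.List.sorted indexed key false with hrk
  have hperm : ranked.Perm indexed := PySem.List.sorted_perm _ _ _
  have hsndidx : indexed.map (fun q => q.2) = PySem.List.pyRange 0 (kw.length : Int) 1 := by
    rw [hidx, List.map_map]
    have := PySem.List.map_fst_enumerate kw (0 : Int)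
    simpa using this
  have hsndperm : (ranked.map (fun q => q.2)).Perm (PySem.List.pyRange 0 (kw.length : Int) 1) := by
    rw [← hsndidx]; exact hperm.map _
  have hsndnodup : (ranked.map (fun q => q.2)).Nodup :=
    hsndperm.nodup_iff.mpr (PySem.List.nodup_pyRange_one _ _)
  have hranknodup : ranked.Nodup := List.Nodup.of_map _ hsndnodup
  have hle : ranked.Pairwise (fun a b => key a ≤ key b) := PySem.List.sorted_pairwise _ _
  have hlt : ranked.Pairwise (fun a b => key a < key b) := by
    have hand := hle.and hranknodup
    exact hand.imp (fun h => lt_of_le_of_ne h.1 (fun he => h.2 (pvKeyInj he)))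
  have hnn : ∀ p ∈ PySem.List.enumerate ranked, 0 ≤ p.2.2 := by
    intro p hp
    obtain ⟨j, hj, rfl⟩ := (PySem.List.mem_enumerate_iff _ _ _).mp hp
    have hmm : ranked[j].2 ∈ ranked.map (fun q => q.2) := List.mem_map_of_mem (List.getElem_mem hj)
    have := hsndperm.mem_iff.mp hmm
    exact (PySem.List.mem_pyRange_one.mp this).1
  have hndsc : ((PySem.List.enumerate ranked).map (fun p => p.2.2)).Nodup := by
    rw [show (fun p : Int × Char × Int => p.2.2)
        = (fun q : Char × Int => q.2) ∘ (fun p : Int × Char × Int => p.2) from rfl, ← List.map_map,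
      PySem.List.map_snd_enumerate]
    exact hsndnodup
  apply List.ext_getElem?
  intro i
  by_cases hi : i < kw.length
  · -- locate (kw[i], i) inside ranked
    have hmem1 : ((0 : Int) + (i : Nat), kw[i]) ∈ PySem.List.enumerate kw :=
      (PySem.List.mem_enumerate_iff _ _ _).mpr ⟨i, hi, rfl⟩
    have hmem2 : (kw[i], (i : Int)) ∈ indexed := by
      rw [hidx]
      have := List.mem_map_of_mem (f := fun p : Int × Char => (p.2, p.1)) hmem1
      simpa using this
    have hmem3 : (kw[i], (i : Int)) ∈ ranked := (PySem.List.mem_sorted _ _ _ _).mpr hmem2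
    obtain ⟨k, hk, hkeq⟩ := List.getElem_of_mem hmem3
    have hmem4 : ((0 : Int) + (k : Nat), (kw[i], (i : Int))) ∈ PySem.List.enumerate ranked := by
      have : ((0 : Int) + (k : Nat), ranked[k]) ∈ PySem.List.enumerate ranked :=
        (PySem.List.mem_enumerate_iff _ _ _).mpr ⟨k, hk, rfl⟩
      rwa [hkeq] at this
    have hlhs : (pvScatter (PySem.List.enumerate ranked) (List.replicate kw.length (0 : Int)))[i]?
        = some ((0 : Int) + (k : Nat)) :=
      pvScatter_get_mem _ _ _ (kw[i]) i hmem4 hndsc hnn (by simpa using hi)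
    -- the count equals k
    have hcnt : (PySem.List.enumerate kw).countP
        (fun p => p.2 < kw[i]! || (p.2 == kw[i]! && p.1 < (i : Int))) = k := by
      have hcongr : (PySem.List.enumerate kw).countP
          (fun p => p.2 < kw[i]! || (p.2 == kw[i]! && p.1 < (i : Int)))
          = (PySem.List.enumerate kw).countP
            (fun p => decide (key ((fun p : Int × Char => (p.2, p.1)) p) < key (ranked[k]'hk))) := by
        apply List.countP_congr
        intro p hp
        rw [hkeq, hkey]
        simp only [getElem!_pos kw i hi]
        rw [Bool.eq_iff_iff]
        simp only [Bool.or_eq_true, Bool.and_eq_true, decide_eq_true_iff, beq_iff_eq,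
          Prod.Lex.lt_iff, ofLex_toLex]
        tauto
      rw [hcongr]
      rw [show (fun p : Int × Char => decide (key ((fun p : Int × Char => (p.2, p.1)) p)
            < key (ranked[k]'hk)))
          = (fun x : Char × Int => decide (key x < key (ranked[k]'hk)))
            ∘ (fun p : Int × Char => (p.2, p.1)) from rfl]
      rw [← List.countP_map, ← hidx, ← hperm.countP_eq]
      exact pvCountP_key_lt key ranked k hk _ rfl hlt
    rw [hlhs]
    simp only [getElem!_pos kw i hi] at hcnt
    simp [hi, hcnt]
  · have h1 : (pvScatter (PySem.List.enumerate ranked)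
        (List.replicate kw.length (0 : Int))).length = kw.length := by
      rw [pvScatter_length]
      have : ranked.length = kw.length := by
        rw [hrk, PySem.List.length_sorted, hidx]
        simp [PySem.List.length_enumerate]
      simp
    rw [List.getElem?_eq_none (by rw [h1]; omega), List.getElem?_eq_none (by simp; omega)]

theorem pvLenKw (keyword : String) (width : Int)
    (hpre : Pre_keyword_to_order keyword width)
    (hge : ¬ ((PySem.Chars.upper (PySem.List.slice keyword.toList none (some width))).length : Int) < width) :
    width.toNat = (PySem.Chars.upper (PySem.List.slice keyword.toList none (some width))).length := by
  have hlen : (PySem.Chars.upper (PySem.List.slice keyword.toList none (some width))).length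
      = (PySem.List.slice keyword.toList none (some width)).length := by
    simp [PySem.Chars.upper]
  rw [hlen] at hge ⊢
  by_cases hw : 0 ≤ width
  · rw [PySem.List.slice_to _ hw] at hge ⊢
    rw [List.length_take] at hge ⊢
    omega
  · have hw' : width < 0 := by omega
    have hkl : keyword.toList.length ≤ (-width).toNat := by
      rcases hpre with h | h
      · omega
      · omega
    have hpos : 0 < (-width).toNat := by omega
    have hwn : width = -(((-width).toNat : Int)) := by omega
    rw [hwn, PySem.List.slice_to_neg_natCast _ _ hpos]
    rw [List.length_take]
    omega

-- ===== VERDICT =====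
theorem keyword_to_order_spec : Claim_equal_keyword_to_order := by
  intro keyword width _ hpre
  unfold Spec_keyword_to_order keyword_to_order keyword_to_order_alt
  simp only []
  by_cases hc : ((PySem.Chars.upper (PySem.List.slice keyword.toList none (some width))).length : Int) < width
  · rw [if_pos hc, if_pos hc]
  · rw [if_neg hc, if_neg hc]
    have hw := pvLenKw keyword width hpre hc
    rw [hw]
    refine congrArg some ?_
    have hB := pvFillCore (PySem.Chars.upper (PySem.List.slice keyword.toList none (some width)))
      (fun p => (((PySem.List.enumerate
          (PySem.Chars.upper (PySem.List.slice keyword.toList none (some width)))).countP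
        (fun q => q.2 < p.2 || (q.2 == p.2 && q.1 < p.1))) : Int))
    exact (pvCore _).trans hB.symm
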